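-- pv_equiv track=rewrite | github.com/tilnp/BarkWatch_Korosci-plus-Tilen_interface | run_web_server.py | _decode_geom_bbox
-- ===== SOURCE A (Python) =====
-- import math
--
-- def _zigzag(n: int) -> int:
--     return (n >> 1) ^ -(n & 1)
--
-- def _decode_geom_bbox(geom_ints):
--     """Return (min_x, min_y, max_x, max_y) in tile pixel coords, or None."""
--     cx = cy = 0
--     min_x = min_y = float('inf')
--     max_x = max_y = float('-inf')
--     i = 0
--     while i < len(geom_ints):
--         cmd = geom_ints[i]; i += 1
--         cmd_id, count = cmd & 0x7, cmd >> 3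
--         if cmd_id == 7:  # ClosePath — no params
--             continue
--         for _ in range(count):
--             if i + 1 >= len(geom_ints): break
--             cx += _zigzag(geom_ints[i]); i += 1
--             cy += _zigzag(geom_ints[i]); i += 1
--             if cx < min_x: min_x = cx
--             if cx > max_x: max_x = cx
--             if cy < min_y: min_y = cy
--             if cy > max_y: max_y = cy
--     if not math.isfinite(min_x):
--         return None
--     return min_x, min_y, max_x, max_y
-- ===== SOURCE B (Python) =====
-- def _decode_geom_bbox(geom_ints):
--     """Return (min_x, min_y, max_x, max_y) in tile pixel coords, or None."""
--     pts = []
--     cx = cy = 0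
--     phase = 0      # 0 = expecting a command, 1 = expecting an x param, 2 = expecting a y param
--     need = 0       # coordinate pairs still owed to the current command
--     for v in geom_ints:
--         if phase == 0:
--             if v & 0x7 != 7:        # ClosePath (7) carries no params
--                 need = v >> 3
--                 if need > 0:
--                     phase = 1
--         elif phase == 1:
--             cx += (v >> 1) ^ -(v & 1)
--             phase = 2
--         else:
--             cy += (v >> 1) ^ -(v & 1)
--             pts.append((cx, cy))
--             need -= 1
--             phase = 1 if need > 0 else 0
--     if not pts:
--         return None
--     xs = [p[0] for p in pts]
--     ys = [p[1] for p in pts]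
--     return min(xs), min(ys), max(xs), max(ys)
-- ===== Notes on version B (the rewrite author's own statement) =====
-- stated objective: alternative
-- what changed: Replaces A's while-loop with a nested for-loop and four running min/max bounds seeded from float('inf') by a single pass driven by a command/param state machine that collects the decoded points, followed by a min()/max() reduction over the point list.
import Mathlib
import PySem

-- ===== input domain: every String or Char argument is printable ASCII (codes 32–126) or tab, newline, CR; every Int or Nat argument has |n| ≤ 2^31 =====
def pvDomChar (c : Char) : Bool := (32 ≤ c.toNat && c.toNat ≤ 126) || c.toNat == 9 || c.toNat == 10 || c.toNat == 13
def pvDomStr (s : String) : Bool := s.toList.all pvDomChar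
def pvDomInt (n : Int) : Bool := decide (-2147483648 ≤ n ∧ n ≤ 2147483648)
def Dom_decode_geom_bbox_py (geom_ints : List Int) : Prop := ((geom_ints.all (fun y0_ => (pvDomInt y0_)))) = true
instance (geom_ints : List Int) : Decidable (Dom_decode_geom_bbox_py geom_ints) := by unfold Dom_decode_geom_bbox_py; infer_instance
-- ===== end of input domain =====

-- B replaces A's while/nested-for loop with running min/max by a single pass
-- (a command/param state machine) that collects the decoded points, then reduces
-- them with min()/max() — objective: alternative (same O(n) cost, different decomposition).

-- ===== PORT A =====
-- _zigzag(n) = (n >> 1) ^ -(n & 1); Lean's '>>>' on Int is Python's '>>' (floor), PySem band/bxor are Python-exact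
def pyZigzag (n : Int) : Int := PySem.Int.bxor (n >>> (1 : Nat)) (-(PySem.Int.band n 1))

-- the four running bounds (min_x, min_y, max_x, max_y); 'none' models the initial
-- (inf, inf, -inf, -inf) state, which every comparison updates at the first point —
-- exact because A's bounds are ±inf exactly until the first point and ints afterwards
def aUpd (cx cy : Int) : Option (Int × Int × Int × Int) → Option (Int × Int × Int × Int)
  | none => some (cx, cy, cx, cy)
  | some (mx, my, Mx, My) =>
      some (if cx < mx then cx else mx, if cy < my then cy else my,
            if cx > Mx then cx else Mx, if cy > My then cy else My)

-- inner 'for _ in range(count)' loop: the 'i + 1 >= len(geom_ints)' break is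
-- 'fewer than two values remain', and the remainder is left for the outer loop
def aInner : Nat → List Int → Int → Int → Option (Int × Int × Int × Int) →
    List Int × Int × Int × Option (Int × Int × Int × Int)
  | 0, rest, cx, cy, st => (rest, cx, cy, st)
  | k + 1, a :: b :: t, cx, cy, st =>
      let cx' := cx + pyZigzag a
      let cy' := cy + pyZigzag b
      aInner k t cx' cy' (aUpd cx' cy' st)
  | _ + 1, rest, cx, cy, st => (rest, cx, cy, st)   -- break

theorem aInner_len (k : Nat) (rest : List Int) (cx cy : Int)
    (st : Option (Int × Int × Int × Int)) :
    (aInner k rest cx cy st).1.length ≤ rest.length := by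
  induction k generalizing rest cx cy st with
  | zero => simp [aInner]
  | succ k ih =>
      match rest with
      | [] => simp [aInner]
      | [a] => simp [aInner]
      | a :: b :: t =>
          simp only [aInner]
          exact le_trans (ih _ _ _ _) (by simp; omega)

-- outer 'while i < len(geom_ints)' loop over the remaining suffix;
-- '(cmd >>> 3).toNat' : range(count) runs max(count, 0) times
def aOuter : List Int → Int → Int → Option (Int × Int × Int × Int) →
    Option (Int × Int × Int × Int)
  | [], _, _, st => st
  | cmd :: t, cx, cy, st =>
      if PySem.Int.band cmd 7 == 7 then aOuter t cx cy st   -- ClosePath: no params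
      else
        let r := aInner (cmd >>> (3 : Nat)).toNat t cx cy st
        aOuter r.1 r.2.1 r.2.2.1 r.2.2.2
  termination_by rest _ _ _ => rest.length
  decreasing_by
    all_goals first
      | exact Nat.lt_succ_of_le (aInner_len _ _ _ _ _)
      | simp

-- 'if not math.isfinite(min_x): return None' is the 'none' state (no point decoded)
def decode_geom_bbox_py (geom_ints : List Int) : Option (Int × Int × Int × Int) :=
  aOuter geom_ints 0 0 none

-- ===== PORT B =====
-- Source B's for-loop as structural recursion over the stream, carrying
-- (phase, need, cx, cy, pts) exactly as Source B does
def bGo : List Int → Int → Int → Int → Int → List (Int × Int) → List (Int × Int)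
  | [], _, _, _, _, pts => pts
  | v :: t, phase, need, cx, cy, pts =>
      if phase == 0 then
        if PySem.Int.band v 7 != 7 then     -- ClosePath (7) carries no params
          let need := v >>> (3 : Nat)
          if need > 0 then bGo t 1 need cx cy pts else bGo t 0 need cx cy pts
        else bGo t 0 need cx cy pts
      else if phase == 1 then
        bGo t 2 need (cx + pyZigzag v) cy pts
      else
        let cy' := cy + pyZigzag v
        let need' := need - 1
        bGo t (if need' > 0 then 1 else 0) need' cx cy' (pts ++ [(cx, cy')])

-- '.getD 0' only unpacks the 'some' that min?/max? return on these nonempty lists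
def decode_geom_bbox_py_alt (geom_ints : List Int) : Option (Int × Int × Int × Int) :=
  match bGo geom_ints 0 0 0 0 [] with
  | [] => none
  | p :: ps =>
      let xs := (p :: ps).map Prod.fst
      let ys := (p :: ps).map Prod.snd
      some ((PySem.List.min? xs (fun x => x)).getD 0,
            (PySem.List.min? ys (fun x => x)).getD 0,
            (PySem.List.max? xs (fun x => x)).getD 0,
            (PySem.List.max? ys (fun x => x)).getD 0)

-- ===== PRECONDITION & SPEC =====
def Spec_decode_geom_bbox_py (geom_ints : List Int) (out : Option (Int × Int × Int × Int)) : Prop := out = decode_geom_bbox_py_alt geom_ints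
instance (geom_ints : List Int) (out : Option (Int × Int × Int × Int)) : Decidable (Spec_decode_geom_bbox_py geom_ints out) := by unfold Spec_decode_geom_bbox_py; infer_instance

-- ===== CLAIM (what is proved, stated in full; the proofs are below) =====
def Claim_equal_decode_geom_bbox_py : Prop := ∀ (geom_ints : List Int), Dom_decode_geom_bbox_py geom_ints → Spec_decode_geom_bbox_py geom_ints (decode_geom_bbox_py geom_ints)

-- ===== LEMMAS AND PROOFS =====

theorem bGo_append (rest : List Int) (ph need cx cy : Int) (pts : List (Int × Int)) :
    bGo rest ph need cx cy pts = pts ++ bGo rest ph need cx cy [] := by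
  induction rest generalizing ph need cx cy pts with
  | nil => simp [bGo]
  | cons v t ih =>
      simp only [bGo]
      split_ifs <;>
        (rw [ih]; try (conv_rhs => rw [ih]); try simp [List.append_assoc])

-- A's outer loop resumed after the inner loop, as one function of the inner fuel
def afterInner (k : Nat) (rest : List Int) (cx cy : Int)
    (st : Option (Int × Int × Int × Int)) : Option (Int × Int × Int × Int) :=
  let r := aInner k rest cx cy st
  aOuter r.1 r.2.1 r.2.2.1 r.2.2.2

theorem afterInner_zero (rest : List Int) (cx cy : Int) (st : Option (Int × Int × Int × Int)) :
    afterInner 0 rest cx cy st = aOuter rest cx cy st := rfl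

theorem afterInner_nil (m : Nat) (cx cy : Int) (st : Option (Int × Int × Int × Int)) :
    afterInner (m + 1) [] cx cy st = st := by
  simp [afterInner, aInner, aOuter]

theorem afterInner_cons2 (m : Nat) (a b : Int) (t : List Int) (cx cy : Int)
    (st : Option (Int × Int × Int × Int)) :
    afterInner (m + 1) (a :: b :: t) cx cy st =
      afterInner m t (cx + pyZigzag a) (cy + pyZigzag b)
        (aUpd (cx + pyZigzag a) (cy + pyZigzag b) st) := by
  simp [afterInner, aInner]

theorem aOuter_single (a cx cy : Int) (st : Option (Int × Int × Int × Int)) :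
    aOuter [a] cx cy st = st := by
  by_cases h7 : PySem.Int.band a 7 = 7
  · simp [aOuter, h7]
  · rcases h : (a >>> (3 : Nat)).toNat with _ | m <;> simp [aOuter, h7, h, aInner]

theorem afterInner_single (m : Nat) (a cx cy : Int) (st : Option (Int × Int × Int × Int)) :
    afterInner (m + 1) [a] cx cy st = st := by
  simp [afterInner, aInner, aOuter_single]

-- B on a lone trailing value in phase 1: the value is eaten as an x param, no point added
theorem bGo_single1 (a k cx cy : Int) (pts : List (Int × Int)) :
    bGo [a] 1 k cx cy pts = pts := by
  simp [bGo]

-- simulation: A's nested loops compute exactly the fold of aUpd over the points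
-- B's state machine emits
theorem sim (n : Nat) : ∀ rest : List Int, rest.length ≤ n →
    (∀ (need cx cy : Int) (st : Option (Int × Int × Int × Int)),
      aOuter rest cx cy st =
        List.foldl (fun s p => aUpd p.1 p.2 s) st (bGo rest 0 need cx cy [])) ∧
    (∀ (k cx cy : Int) (st : Option (Int × Int × Int × Int)), 0 < k →
      afterInner k.toNat rest cx cy st =
        List.foldl (fun s p => aUpd p.1 p.2 s) st (bGo rest 1 k cx cy [])) := by
  induction n with
  | zero =>
      intro rest hlen
      have hr : rest = [] := List.length_eq_zero_iff.mp (Nat.le_zero.mp hlen)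
      subst hr
      refine ⟨fun need cx cy st => by simp [aOuter, bGo], fun k cx cy st hk => ?_⟩
      rw [show k.toNat = (k.toNat - 1) + 1 by omega, afterInner_nil]
      simp [bGo]
  | succ n ihn =>
      intro rest hlen
      constructor
      · intro need cx cy st
        match rest with
        | [] => simp [aOuter, bGo]
        | v :: t =>
          have ht : t.length ≤ n := by simp [List.length_cons] at hlen; omega
          by_cases h7 : PySem.Int.band v 7 = 7
          · have ha : aOuter (v :: t) cx cy st = aOuter t cx cy st := by
              simp [aOuter, h7]
            have hb : bGo (v :: t) 0 need cx cy [] = bGo t 0 need cx cy [] := by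
              simp [bGo, h7]
            rw [ha, hb]; exact (ihn t ht).1 need cx cy st
          · by_cases hc : (0 : Int) < v >>> (3 : Nat)
            · have ha : aOuter (v :: t) cx cy st =
                  afterInner (v >>> (3 : Nat)).toNat t cx cy st := by
                simp [aOuter, h7, afterInner]
              have hb : bGo (v :: t) 0 need cx cy [] =
                  bGo t 1 (v >>> (3 : Nat)) cx cy [] := by
                simp [bGo, h7, hc]
              rw [ha, hb]; exact (ihn t ht).2 _ cx cy st hc
            · have h0 : (v >>> (3 : Nat)).toNat = 0 := by omega
              have ha : aOuter (v :: t) cx cy st = aOuter t cx cy st := by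
                simp [aOuter, h7, h0, aInner]
              have hb : bGo (v :: t) 0 need cx cy [] =
                  bGo t 0 (v >>> (3 : Nat)) cx cy [] := by
                simp [bGo, h7, hc]
              rw [ha, hb]; exact (ihn t ht).1 _ cx cy st
      · intro k cx cy st hk
        match rest with
        | [] =>
            rw [show k.toNat = (k.toNat - 1) + 1 by omega, afterInner_nil]
            simp [bGo]
        | [a] =>
            rw [show k.toNat = (k.toNat - 1) + 1 by omega, afterInner_single,
                bGo_single1 a k cx cy]
            simp
        | a :: b :: t =>
            have ht : t.length ≤ n := by simp [List.length_cons] at hlen; omega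
            rw [show k.toNat = (k.toNat - 1) + 1 by omega, afterInner_cons2]
            by_cases hk1 : (0 : Int) < k - 1
            · have hb : bGo (a :: b :: t) 1 k cx cy [] =
                  bGo t 1 (k - 1) (cx + pyZigzag a) (cy + pyZigzag b)
                    [(cx + pyZigzag a, cy + pyZigzag b)] := by
                simp [bGo, show (1 : Int) < k from by omega]
              rw [hb, bGo_append, show k.toNat - 1 = (k - 1).toNat by omega,
                  (ihn t ht).2 (k - 1) _ _ _ hk1]
              simp [List.foldl_cons]
            · have hk1' : k = 1 := by omega
              subst hk1'
              have hb : bGo (a :: b :: t) 1 1 cx cy [] =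
                  bGo t 0 (1 - 1) (cx + pyZigzag a) (cy + pyZigzag b)
                    [(cx + pyZigzag a, cy + pyZigzag b)] := by
                simp [bGo]
              rw [hb, bGo_append, show (1 : Int).toNat - 1 = 0 by omega, afterInner_zero,
                  (ihn t ht).1 (1 - 1) _ _ _]
              simp [List.foldl_cons]

theorem fold_some (ps : List (Int × Int)) : ∀ mx my Mx My : Int,
    List.foldl (fun s p => aUpd p.1 p.2 s) (some (mx, my, Mx, My)) ps =
      some ((ps.map Prod.fst).foldl min mx, (ps.map Prod.snd).foldl min my,
            (ps.map Prod.fst).foldl max Mx, (ps.map Prod.snd).foldl max My) := by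
  induction ps with
  | nil => simp
  | cons p ps ih =>
      intro mx my Mx My
      have h1 : (if p.1 < mx then p.1 else mx) = min mx p.1 := by
        rw [min_def]; split_ifs <;> omega
      have h2 : (if p.2 < my then p.2 else my) = min my p.2 := by
        rw [min_def]; split_ifs <;> omega
      have h3 : (if p.1 > Mx then p.1 else Mx) = max Mx p.1 := by
        rw [max_def]; split_ifs <;> omega
      have h4 : (if p.2 > My then p.2 else My) = max My p.2 := by
        rw [max_def]; split_ifs <;> omega
      have hstep : aUpd p.1 p.2 (some (mx, my, Mx, My)) =
          some (min mx p.1, min my p.2, max Mx p.1, max My p.2) := by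
        simp only [aUpd]; rw [h1, h2, h3, h4]
      have hhead : List.foldl (fun s (q : Int × Int) => aUpd q.1 q.2 s)
            (some (mx, my, Mx, My)) (p :: ps) =
          List.foldl (fun s (q : Int × Int) => aUpd q.1 q.2 s)
            (aUpd p.1 p.2 (some (mx, my, Mx, My))) ps := rfl
      rw [hhead, hstep, ih]
      simp [List.foldl_cons]

theorem fold_none (pts : List (Int × Int)) :
    List.foldl (fun s p => aUpd p.1 p.2 s) none pts =
      match pts with
      | [] => none
      | p :: ps =>
          some ((ps.map Prod.fst).foldl min p.1, (ps.map Prod.snd).foldl min p.2,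
                (ps.map Prod.fst).foldl max p.1, (ps.map Prod.snd).foldl max p.2) := by
  match pts with
  | [] => rfl
  | p :: ps =>
      have hhead : List.foldl (fun s (q : Int × Int) => aUpd q.1 q.2 s) none (p :: ps) =
          List.foldl (fun s (q : Int × Int) => aUpd q.1 q.2 s)
            (some (p.1, p.2, p.1, p.2)) ps := rfl
      rw [hhead, fold_some]

-- ===== VERDICT (by name: the statement is the Claim_ definition above) =====
theorem decode_geom_bbox_py_spec : Claim_equal_decode_geom_bbox_py := by
  intro g _
  unfold Spec_decode_geom_bbox_py decode_geom_bbox_py decode_geom_bbox_py_alt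
  rw [(sim g.length g le_rfl).1 0 0 0 none, fold_none]
  match h : bGo g 0 0 0 0 [] with
  | [] => rfl
  | p :: ps =>
      simp [PySem.List.min?_id_cons, PySem.List.max?_id_cons]
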